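-- pv_equiv track=rewrite | github.com/schrifty/bpo | src/hydrate_qbr_agenda.py | qbr_agenda_items_from_plan
-- ===== SOURCE A (Python) =====
-- from typing import Any
--
-- def qbr_agenda_items_from_plan(slide_plan: list[dict[str, Any]]) -> list[str]:
--     """Same section ordering as the QBR agenda slide builder."""
--     divider_items = [
--         str(entry.get("title", "")).strip()
--         for entry in slide_plan
--         if entry.get("slide_type", entry.get("id", "")) == "qbr_divider" and entry.get("title")
--     ]
--     divider_items = [title for title in divider_items if title]
--     if divider_items:
--         return divider_items
--
--     skip_types = {"qbr_cover", "qbr_agenda", "title", "data_quality", "skip"}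
--     out: list[str] = []
--     for entry in slide_plan:
--         slide_type = entry.get("slide_type", entry.get("id", ""))
--         if slide_type in skip_types:
--             continue
--         title = str(entry.get("title", "") or "").strip() or str(entry.get("id", "")).replace("_", " ").title()
--         if title:
--             out.append(title)
--     return out
-- ===== SOURCE B (Python) =====
-- def qbr_agenda_items_from_plan(slide_plan):
--     """Recursive decomposition: classify every entry once into an optional divider
--     title and an optional fallback item, combine contributions by structural
--     recursion on the list, and pick the divider track if it produced anything."""
--
--     def contrib(entry):
--         stype = entry.get("slide_type", entry.get("id", ""))
--         raw = entry.get("title", "")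
--         div = None
--         if stype == "qbr_divider" and raw:
--             s = str(raw).strip()
--             if s:
--                 div = s
--         item = None
--         if stype not in ("qbr_cover", "qbr_agenda", "title", "data_quality", "skip"):
--             s = str(raw or "").strip()
--             t = s if s else str(entry.get("id", "")).replace("_", " ").title()
--             if t:
--                 item = t
--         return div, item
--
--     def go(rest):
--         if not rest:
--             return [], []
--         div, item = contrib(rest[0])
--         ds, its = go(rest[1:])
--         return (([div] + ds) if div is not None else ds,
--                 ([item] + its) if item is not None else its)
--
--     ds, its = go(slide_plan)
--     return ds or its
-- ===== Notes on version B (the rewrite author's own statement) =====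
-- stated objective: alternative
-- what changed: Replaces A's staged list passes (divider comprehension, filtering re-pass, separate accumulator loop) with a per-entry classifier returning optional contributions and a structural recursion that combines them back-to-front by prepending, then picks the non-empty track.
import Mathlib
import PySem

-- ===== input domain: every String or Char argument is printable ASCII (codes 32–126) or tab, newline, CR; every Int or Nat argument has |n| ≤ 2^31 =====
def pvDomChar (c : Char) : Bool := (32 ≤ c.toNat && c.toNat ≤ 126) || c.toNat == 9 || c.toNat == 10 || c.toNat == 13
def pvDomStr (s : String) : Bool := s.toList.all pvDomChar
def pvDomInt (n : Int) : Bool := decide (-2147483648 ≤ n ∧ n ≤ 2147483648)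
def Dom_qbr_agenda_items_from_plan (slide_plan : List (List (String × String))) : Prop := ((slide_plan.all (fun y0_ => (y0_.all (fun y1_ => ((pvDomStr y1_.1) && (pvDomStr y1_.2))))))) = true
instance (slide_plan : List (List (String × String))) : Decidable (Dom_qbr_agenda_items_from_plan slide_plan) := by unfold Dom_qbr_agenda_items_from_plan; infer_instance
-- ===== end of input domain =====

-- B replaces A's staged list passes by a per-entry classifier (two optional
-- contributions) combined by structural recursion, prepending back-to-front
-- (objective: alternative decomposition, same cost).

-- shared primitive port: dict.get(k, dflt) on an association list (first match)
def pvGetD (d : List (String × String)) (k dflt : String) : String :=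
  match d.find? (fun p => p.1 == k) with
  | some p => p.2
  | none => dflt

-- str.title(): exact on the ASCII domain (uppercase a letter after a non-letter, lowercase otherwise)
def pvTitleChars : Bool → List Char → List Char
  | _, [] => []
  | prev, c :: cs => (if prev then c.toLower else c.toUpper) :: pvTitleChars c.isAlpha cs

def pvTitle (s : String) : String := String.ofList (pvTitleChars false s.toList)

def qbrSkipTypes : List String := ["qbr_cover", "qbr_agenda", "title", "data_quality", "skip"]

-- ===== PORT A =====
def qbr_agenda_items_from_plan (slide_plan : List (List (String × String))) : List String :=
  let divider_items :=
    (slide_plan.filter (fun entry =>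
        pvGetD entry "slide_type" (pvGetD entry "id" "") == "qbr_divider" &&
        pvGetD entry "title" "" != "")).map
      (fun entry => PySem.Str.strip (pvGetD entry "title" ""))
  let divider_items := divider_items.filter (fun title => title != "")
  if divider_items ≠ [] then divider_items
  else
    slide_plan.foldl (fun out entry =>
      let slide_type := pvGetD entry "slide_type" (pvGetD entry "id" "")
      if slide_type ∈ qbrSkipTypes then out
      else
        let s := PySem.Str.strip (pvGetD entry "title" "")
        let title := if s != "" then s else pvTitle (PySem.Str.replace (pvGetD entry "id" "") "_" " ")
        if title != "" then out ++ [title] else out) []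

-- ===== PORT B =====
-- contrib(entry): optional divider contribution and optional fallback item
def qbrContrib (entry : List (String × String)) : Option String × Option String :=
  let stype := pvGetD entry "slide_type" (pvGetD entry "id" "")
  let raw := pvGetD entry "title" ""
  let div : Option String :=
    if stype == "qbr_divider" && raw != "" then
      (let s := PySem.Str.strip raw
       if s != "" then some s else none)
    else none
  let item : Option String :=
    if stype ∈ ["qbr_cover", "qbr_agenda", "title", "data_quality", "skip"] then none
    else
      (let s := PySem.Str.strip raw
       let t := if s != "" then s else pvTitle (PySem.Str.replace (pvGetD entry "id" "") "_" " ")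
       if t != "" then some t else none)
  (div, item)

-- go(rest): structural recursion, prepending each entry's contributions
def qbrGo : List (List (String × String)) → List String × List String
  | [] => ([], [])
  | e :: rest =>
    let c := qbrContrib e
    let r := qbrGo rest
    ((match c.1 with | some d => d :: r.1 | none => r.1),
     (match c.2 with | some t => t :: r.2 | none => r.2))

def qbr_agenda_items_from_plan_alt (slide_plan : List (List (String × String))) : List String :=
  let r := qbrGo slide_plan
  if r.1 ≠ [] then r.1 else r.2

-- ===== PRECONDITION & SPEC =====
def Spec_qbr_agenda_items_from_plan (slide_plan : List (List (String × String))) (out : List String) : Prop := out = qbr_agenda_items_from_plan_alt slide_plan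
instance (slide_plan : List (List (String × String))) (out : List String) : Decidable (Spec_qbr_agenda_items_from_plan slide_plan out) := by unfold Spec_qbr_agenda_items_from_plan; infer_instance

-- ===== CLAIM (what is proved, stated in full; the proofs are below) =====
def Claim_equal_qbr_agenda_items_from_plan : Prop := ∀ (slide_plan : List (List (String × String))), Dom_qbr_agenda_items_from_plan slide_plan → Spec_qbr_agenda_items_from_plan slide_plan (qbr_agenda_items_from_plan slide_plan)

-- ===== LEMMAS AND PROOFS =====

-- per-entry contribution to A's divider list
def qbrDivC (entry : List (String × String)) : List String :=
  if pvGetD entry "slide_type" (pvGetD entry "id" "") == "qbr_divider" &&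
     pvGetD entry "title" "" != "" then
    (if PySem.Str.strip (pvGetD entry "title" "") != ""
     then [PySem.Str.strip (pvGetD entry "title" "")] else [])
  else []

-- per-entry contribution to A's fallback list
def qbrOutC (entry : List (String × String)) : List String :=
  if pvGetD entry "slide_type" (pvGetD entry "id" "") ∈ qbrSkipTypes then []
  else
    let s := PySem.Str.strip (pvGetD entry "title" "")
    let title := if s != "" then s else pvTitle (PySem.Str.replace (pvGetD entry "id" "") "_" " ")
    if title != "" then [title] else []

theorem qbrA_fold (xs : List (List (String × String))) (out0 : List String) :
    xs.foldl (fun out entry =>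
      let slide_type := pvGetD entry "slide_type" (pvGetD entry "id" "")
      if slide_type ∈ qbrSkipTypes then out
      else
        let s := PySem.Str.strip (pvGetD entry "title" "")
        let title := if s != "" then s else pvTitle (PySem.Str.replace (pvGetD entry "id" "") "_" " ")
        if title != "" then out ++ [title] else out) out0
    = out0 ++ xs.flatMap qbrOutC := by
  induction xs generalizing out0 with
  | nil => simp
  | cons e rest ih =>
      simp only [List.foldl_cons, List.flatMap_cons, ih, qbrOutC]
      split_ifs <;> simp

theorem qbrA_div (xs : List (List (String × String))) :
    ((xs.filter (fun entry =>
        pvGetD entry "slide_type" (pvGetD entry "id" "") == "qbr_divider" &&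
        pvGetD entry "title" "" != "")).map
      (fun entry => PySem.Str.strip (pvGetD entry "title" ""))).filter (fun title => title != "")
    = xs.flatMap qbrDivC := by
  induction xs with
  | nil => simp
  | cons e rest ih =>
      simp only [List.flatMap_cons, qbrDivC, ← ih, List.filter_cons]
      split_ifs with h1 h2 <;> simp_all

-- B's classifier computes exactly A's per-entry contributions (as optional singletons)
theorem qbrContrib_fst (e : List (String × String)) :
    (match (qbrContrib e).1 with | some d => [d] | none => []) = qbrDivC e := by
  simp only [qbrContrib, qbrDivC]
  split_ifs <;> simp

theorem qbrContrib_snd (e : List (String × String)) :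
    (match (qbrContrib e).2 with | some t => [t] | none => []) = qbrOutC e := by
  simp only [qbrContrib, qbrOutC, qbrSkipTypes]
  split_ifs <;> simp

theorem qbrGo_eq (xs : List (List (String × String))) :
    qbrGo xs = (xs.flatMap qbrDivC, xs.flatMap qbrOutC) := by
  induction xs with
  | nil => rfl
  | cons e rest ih =>
      simp only [qbrGo, ih, List.flatMap_cons, ← qbrContrib_fst e, ← qbrContrib_snd e]
      cases (qbrContrib e).1 <;> cases (qbrContrib e).2 <;> simp

-- ===== VERDICT (by name: the statement is the Claim_ definition above) =====
theorem qbr_agenda_items_from_plan_spec : Claim_equal_qbr_agenda_items_from_plan := by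
  intro sp _
  show qbr_agenda_items_from_plan sp = qbr_agenda_items_from_plan_alt sp
  unfold qbr_agenda_items_from_plan qbr_agenda_items_from_plan_alt
  simp only [qbrA_fold, qbrA_div, qbrGo_eq, List.nil_append]
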